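-- pv_equiv track=rewrite | github.com/autumn-city/APIDocBooster | data/torch_related_SO_posts/API_extraction.py | initial_match
-- ===== SOURCE A (Python) =====
-- def initial_match(apis, candidates):
--     # count the api frequency in the candidates
--     # here we compare the simple API name but not the fully qualified names
--     # output: dic [api, frequency]
--     _return = {}
--     for item in apis:
--         count = 0
--         for candidate in candidates:
--             if item==candidate:
--                 count+=1
--         _return[item]=count
--     return _return
-- ===== SOURCE B (Python) =====
-- def initial_match(apis, candidates):
--     # Single pass over candidates with running counts, instead of a nested scan per api.
--     _return = {api: 0 for api in apis}
--     for candidate in candidates: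
--         if candidate in _return:
--             _return[candidate] = _return[candidate] + 1
--     return _return
-- ===== Notes on version B (the rewrite author's own statement) =====
-- stated objective: faster
-- what changed: Replaces the apis-outer/candidates-inner nested scan by seeding all apis to 0 and then a single candidates-driven pass that increments the running count of each candidate that is a key.
import Mathlib
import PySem

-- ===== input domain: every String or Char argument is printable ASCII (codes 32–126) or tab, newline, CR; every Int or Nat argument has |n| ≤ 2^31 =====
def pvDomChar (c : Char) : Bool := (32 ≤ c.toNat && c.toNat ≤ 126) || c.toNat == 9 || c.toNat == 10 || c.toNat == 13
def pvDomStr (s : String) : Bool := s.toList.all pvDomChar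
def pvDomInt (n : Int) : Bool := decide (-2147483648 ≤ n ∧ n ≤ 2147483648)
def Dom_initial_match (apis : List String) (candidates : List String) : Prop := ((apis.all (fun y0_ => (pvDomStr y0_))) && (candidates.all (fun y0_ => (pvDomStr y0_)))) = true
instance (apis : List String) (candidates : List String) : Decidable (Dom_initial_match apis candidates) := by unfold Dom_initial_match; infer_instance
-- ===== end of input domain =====

-- B replaces A's nested apis×candidates scan by seeding every api to 0 and one
-- candidates-driven pass that increments the running count of present keys (objective: faster).

-- ===== PORT A =====
def initial_match (apis : List String) (candidates : List String) : List (String × Int) :=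
  (apis.foldl
    (fun d item =>
      d.insert item
        (candidates.foldl (fun count candidate => if item == candidate then count + 1 else count) (0 : Int)))
    PySem.Dict.empty).items

-- ===== PORT B =====
def initial_match_alt (apis : List String) (candidates : List String) : List (String × Int) :=
  let ret := apis.foldl (fun d api => d.insert api (0 : Int)) PySem.Dict.empty
  (candidates.foldl
    (fun d candidate =>
      if d.contains candidate then d.insert candidate (d.getD candidate 0 + 1) else d)
    ret).items

-- ===== PRECONDITION & SPEC =====
def Spec_initial_match (apis : List String) (candidates : List String) (out : List (String × Int)) : Prop := out = initial_match_alt apis candidates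
instance (apis : List String) (candidates : List String) (out : List (String × Int)) : Decidable (Spec_initial_match apis candidates out) := by unfold Spec_initial_match; infer_instance

-- ===== CLAIM (what is proved, stated in full; the proofs are below) =====
def Claim_equal_initial_match : Prop := ∀ (apis : List String) (candidates : List String), Dom_initial_match apis candidates → Spec_initial_match apis candidates (initial_match apis candidates)

-- ===== LEMMAS AND PROOFS =====


theorem countLoop_aux (item : String) (cs : List String) : ∀ (a : Int),
    cs.foldl (fun count candidate => if item == candidate then count + 1 else count) a
      = a + (cs.count item : Int) := by
  induction cs with
  | nil => intro a; simp
  | cons c cs ih =>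
    intro a
    simp only [List.foldl_cons, List.count_cons, ih]
    by_cases h : item = c
    · subst h; simp; ring
    · have h1 : (item == c) = false := by simp [h]
      have h2 : (c == item) = false := by simp [Ne.symm h]
      simp [h1, h2]

theorem itemsA (f : String → Int) (l : List String) : ∀ (d e : PySem.Dict String Int),
    e.items = d.items.map (fun p => (p.1, f p.1)) →
    (l.foldl (fun d i => d.insert i (f i)) e).items
      = (l.foldl (fun d i => d.insert i (0 : Int)) d).items.map (fun p => (p.1, f p.1)) := by
  induction l with
  | nil => intro d e h; simpa using h
  | cons i l ih =>
    intro d e h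
    simp only [List.foldl_cons]
    apply ih
    have hk : e.keys = d.keys := by
      simp only [PySem.Dict.keys, h, List.map_map]; rfl
    have hc : e.contains i = d.contains i := by
      rw [PySem.Dict.contains_eq_decide_mem_keys, PySem.Dict.contains_eq_decide_mem_keys, hk]
    by_cases hd : d.contains i = true
    · rw [PySem.Dict.items_insert_of_contains _ _ (hc ▸ hd),
          PySem.Dict.items_insert_of_contains _ _ hd, h, List.map_map, List.map_map]
      apply List.map_congr_left
      intro p _
      by_cases hp : p.1 = i
      · simp [hp]
      · simp [hp]
    · have hd' : d.contains i = false := by simpa using hd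
      rw [PySem.Dict.items_insert_of_not_contains _ _ (hc ▸ hd'),
          PySem.Dict.items_insert_of_not_contains _ _ hd', h]
      simp

theorem itemsB (cs : List String) : ∀ (d : PySem.Dict String Int), d.keys.Nodup →
    (cs.foldl (fun d c => if d.contains c then d.insert c (d.getD c 0 + 1) else d) d).items
      = d.items.map (fun p => (p.1, p.2 + (cs.count p.1 : Int))) := by
  induction cs with
  | nil => intro d _; simp
  | cons c cs ih =>
    intro d hnd
    simp only [List.foldl_cons]
    by_cases hc : d.contains c = true
    · rw [if_pos hc, ih _ (PySem.Dict.nodup_keys_insert d c _ hnd),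
          PySem.Dict.items_insert_of_contains _ _ hc, List.map_map]
      apply List.map_congr_left
      intro p hp
      by_cases hpc : p.1 = c
      · have hval : d.getD c 0 = p.2 := by
          have : (c, p.2) ∈ d.items := by rw [← hpc]; exact hp
          exact PySem.Dict.getD_of_mem_items d this hnd 0
        simp only [Function.comp, hpc, beq_self_eq_true, if_pos, hval]
        simp; ring
      · have h1 : (p.1 == c) = false := by simp [hpc]
        have hpc' : ¬ c = p.1 := fun h => hpc h.symm
        simp [Function.comp, h1, hpc']
    · have hc' : d.contains c = false := by simpa using hc
      rw [if_neg (by simp [hc']), ih _ hnd]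
      apply List.map_congr_left
      intro p hp
      have hpc : ¬ c = p.1 := by
        intro h
        have : d.contains c = true := by
          rw [PySem.Dict.contains_iff_mem_keys, h]
          exact List.mem_map_of_mem hp
        simp [this] at hc'
      simp [hpc]

theorem seed_val (l : List String) : ∀ (d : PySem.Dict String Int),
    (∀ p ∈ d.items, p.2 = (0 : Int)) →
    ∀ p ∈ (l.foldl (fun d i => d.insert i (0 : Int)) d).items, p.2 = (0 : Int) := by
  induction l with
  | nil => intro d h; simpa using h
  | cons i l ih =>
    intro d h
    simp only [List.foldl_cons]
    apply ih
    intro p hp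
    rcases (PySem.Dict.mem_items_insert _ _ _ _).mp hp with h1 | h2
    · simp [h1]
    · exact h p h2.1

-- ===== VERDICT (by name: the statement is the Claim_ definition above) =====
theorem initial_match_spec : Claim_equal_initial_match := by
  intro apis candidates _
  unfold Spec_initial_match initial_match initial_match_alt
  rw [itemsA _ apis PySem.Dict.empty PySem.Dict.empty (by simp [PySem.Dict.empty]),
      itemsB candidates _
        (PySem.Dict.nodup_keys_foldl_insert apis (fun _ _ => (0 : Int)) PySem.Dict.empty
          PySem.Dict.nodup_keys_empty)]
  apply List.map_congr_left
  intro p hp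
  have h0 : p.2 = (0 : Int) :=
    seed_val apis PySem.Dict.empty (by simp [PySem.Dict.empty]) p hp
  rw [countLoop_aux, h0]
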